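-- pv_equiv track=rewrite | github.com/mcleish7/arithmetic | dataset_analysis.py | consecutive_digit_counts
-- ===== SOURCE A (Python) =====
-- def consecutive_digit_counts(input_strings):
--     """Count the number of times a digit is repeated"""
--     counts_by_digit = {}
--
--     for input_str in input_strings:
--         current_digit = None
--         consecutive_count = 0
--
--         for char in input_str:
--             if char.isdigit():
--                 if char == current_digit:
--                     consecutive_count += 1
--                 else:
--                     if current_digit is not None:
--                         # Update the dictionary with consecutive count
--                         if consecutive_count != 1:
--                             counts_by_digit.setdefault(current_digit, {}).setdefault(consecutive_count, 0)
--                             counts_by_digit[current_digit][consecutive_count] += 1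
--
--                     current_digit = char
--                     consecutive_count = 1
--
--         # Update the dictionary for the last digit in the string
--         if current_digit is not None:
--             if consecutive_count != 1:
--                 counts_by_digit.setdefault(current_digit, {}).setdefault(consecutive_count, 0)
--                 counts_by_digit[current_digit][consecutive_count] += 1
--
--     return counts_by_digit
-- ===== SOURCE B (Python) =====
-- def _runs(ds):
--     """Two-pointer run extraction: list of (element, run length)."""
--     runs = []
--     i = 0
--     while i < len(ds):
--         x = ds[i]
--         j = i
--         while j < len(ds) and ds[j] == x:
--             j += 1
--         runs.append((x, j - i))
--         i = j
--     return runs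
--
--
-- def consecutive_digit_counts(input_strings):
--     """Count the number of times a digit is repeated"""
--     counts_by_digit = {}
--     for input_str in input_strings:
--         digits = [c for c in input_str if c.isdigit()]
--         for d, n in _runs(digits):
--             if n != 1:
--                 inner = counts_by_digit.setdefault(d, {})
--                 inner[n] = inner.get(n, 0) + 1
--     return counts_by_digit
-- ===== Notes on version B (the rewrite author's own statement) =====
-- stated objective: simpler
-- what changed: Replaces A's char-by-char current_digit/consecutive_count state machine with its duplicated end-of-string flush by first filtering out the digit characters and then extracting (digit, run-length) pairs with a two-pointer scan, folding the length!=1 counts into the dict per run.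
import Mathlib
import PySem

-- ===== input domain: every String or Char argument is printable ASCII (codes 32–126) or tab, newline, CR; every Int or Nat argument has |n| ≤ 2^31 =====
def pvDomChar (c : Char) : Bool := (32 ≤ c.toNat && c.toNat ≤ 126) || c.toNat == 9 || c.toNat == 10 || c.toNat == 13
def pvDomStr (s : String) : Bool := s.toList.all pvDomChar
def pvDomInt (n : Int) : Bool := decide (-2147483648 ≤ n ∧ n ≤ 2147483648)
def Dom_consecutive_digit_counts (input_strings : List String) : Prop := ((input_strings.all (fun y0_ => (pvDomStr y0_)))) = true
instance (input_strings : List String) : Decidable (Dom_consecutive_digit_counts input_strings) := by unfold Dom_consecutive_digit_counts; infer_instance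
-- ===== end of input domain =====

-- B replaces A's char-by-char state machine (with its duplicated end-of-string flush) by
-- filtering the digits first and extracting runs with a two-pointer scan: objective 'simpler'.

-- counts.setdefault(k, {}).setdefault(n, 0); counts[k][n] += 1  — the dict update both Pythons perform
def pvBump (d : PySem.Dict Char (PySem.Dict Int Int)) (c : Char) (n : Int) :
    PySem.Dict Char (PySem.Dict Int Int) :=
  d.modify c PySem.Dict.empty (fun inner => inner.modify n 0 (· + 1))

-- ===== PORT A =====
-- the duplicated "update the dictionary with consecutive count" block of A
def pvFlushA (cur : Option Char) (cnt : Int) (d : PySem.Dict Char (PySem.Dict Int Int)) :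
    PySem.Dict Char (PySem.Dict Int Int) :=
  match cur with
  | some x => if cnt ≠ 1 then pvBump d x cnt else d
  | none => d

-- body of A's inner `for char in input_str` loop
def pvStepA (st : Option Char × Int × PySem.Dict Char (PySem.Dict Int Int)) (ch : Char) :
    Option Char × Int × PySem.Dict Char (PySem.Dict Int Int) :=
  if PySem.Chars.isdigit ch then
    if some ch = st.1 then (st.1, st.2.1 + 1, st.2.2)
    else (some ch, 1, pvFlushA st.1 st.2.1 st.2.2)
  else st

def consecutive_digit_counts (input_strings : List String) : List (String × List (Int × Int)) :=
  let counts := input_strings.foldl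
    (fun d s =>
      let st := s.toList.foldl pvStepA (none, 0, d)
      pvFlushA st.1 st.2.1 st.2.2)
    PySem.Dict.empty
  counts.items.map (fun p => (String.ofList [p.1], p.2.items))

-- ===== PORT B =====
-- inner `while j < len(ds) and ds[j] == x: j += 1` of B's _runs
def pvRunEnd (ds : List Char) (x : Char) (j : Nat) : Nat :=
  if h : j < ds.length then
    if ds[j] = x then pvRunEnd ds x (j + 1) else j
  else j
termination_by ds.length - j

-- outer `while i < len(ds)` of B's _runs (the run list built front to back)
def pvRunsIdx (ds : List Char) (i : Nat) : List (Char × Int) :=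
  if h : i < ds.length then
    let j := pvRunEnd ds ds[i] (i + 1)
    (ds[i], (j : Int) - (i : Int)) :: pvRunsIdx ds j
  else []
termination_by ds.length - i
decreasing_by
  have : i + 1 ≤ pvRunEnd ds ds[i] (i + 1) := by
    clear j
    generalize ds[i] = x
    generalize i + 1 = k
    induction k using pvRunEnd.induct ds x with
    | case1 k hk heq ih => rw [pvRunEnd, dif_pos hk, if_pos heq]; omega
    | case2 k hk heq => rw [pvRunEnd, dif_pos hk, if_neg heq]
    | case3 k hk => rw [pvRunEnd, dif_neg hk]
  omega

def consecutive_digit_counts_alt (input_strings : List String) : List (String × List (Int × Int)) :=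
  let counts := input_strings.foldl
    (fun d s =>
      (pvRunsIdx (s.toList.filter PySem.Chars.isdigit) 0).foldl
        (fun d p => if p.2 ≠ 1 then pvBump d p.1 p.2 else d) d)
    PySem.Dict.empty
  counts.items.map (fun p => (String.ofList [p.1], p.2.items))

-- ===== PRECONDITION & SPEC =====
def Spec_consecutive_digit_counts (input_strings : List String) (out : List (String × List (Int × Int))) : Prop := out = consecutive_digit_counts_alt input_strings
instance (input_strings : List String) (out : List (String × List (Int × Int))) : Decidable (Spec_consecutive_digit_counts input_strings out) := by unfold Spec_consecutive_digit_counts; infer_instance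

-- ===== CLAIM (what is proved, stated in full; the proofs are below) =====
def Claim_equal_consecutive_digit_counts : Prop := ∀ (input_strings : List String), Dom_consecutive_digit_counts input_strings → Spec_consecutive_digit_counts input_strings (consecutive_digit_counts input_strings)

-- ===== LEMMAS AND PROOFS =====

-- spec-level view of a run list: pending run (x, cnt) followed by the runs of the rest
def pvRunsAux (x : Char) (cnt : Int) : List Char → List (Char × Int)
  | [] => [(x, cnt)]
  | c :: rest => if c = x then pvRunsAux x (cnt + 1) rest else (x, cnt) :: pvRunsAux c 1 rest

def pvRuns : List Char → List (Char × Int)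
  | [] => []
  | c :: rest => pvRunsAux c 1 rest

def pvBumpStep (d : PySem.Dict Char (PySem.Dict Int Int)) (p : Char × Int) :
    PySem.Dict Char (PySem.Dict Int Int) :=
  if p.2 ≠ 1 then pvBump d p.1 p.2 else d

theorem pvRunEnd_bounds (ds : List Char) (x : Char) (j : Nat) :
    j ≤ pvRunEnd ds x j ∧ pvRunEnd ds x j ≤ max j ds.length := by
  induction j using pvRunEnd.induct ds x with
  | case1 k hk heq ih => rw [pvRunEnd, dif_pos hk, if_pos heq]; omega
  | case2 k hk heq => rw [pvRunEnd, dif_pos hk, if_neg heq]; omega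
  | case3 k hk => rw [pvRunEnd, dif_neg hk]; omega

-- pvRunsAux on a drop, in terms of pvRunEnd
theorem pvRunsAux_drop (ds : List Char) (x : Char) :
    ∀ k cnt, k ≤ ds.length →
      pvRunsAux x cnt (ds.drop k) =
        (x, cnt + ((pvRunEnd ds x k : Int) - (k : Int))) :: pvRuns (ds.drop (pvRunEnd ds x k)) := by
  intro k
  induction k using pvRunEnd.induct ds x with
  | case1 k hk heq ih =>
    intro cnt _
    have hd : ds.drop k = ds[k] :: ds.drop (k + 1) := List.drop_eq_getElem_cons hk
    rw [pvRunEnd, dif_pos hk, if_pos heq, hd]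
    have hb := pvRunEnd_bounds ds x (k + 1)
    rw [pvRunsAux, if_pos heq, ih (cnt + 1) (by omega)]
    congr 1
    have : (cnt + 1) + ((pvRunEnd ds x (k+1) : Int) - (↑(k+1))) = cnt + ((pvRunEnd ds x (k+1) : Int) - k) := by
      push_cast; ring
    rw [this]
  | case2 k hk heq =>
    intro cnt _
    have hd : ds.drop k = ds[k] :: ds.drop (k + 1) := List.drop_eq_getElem_cons hk
    rw [pvRunEnd, dif_pos hk, if_neg heq, hd, pvRunsAux, if_neg heq]
    simp [pvRuns]
  | case3 k hk =>
    intro cnt hkle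
    have hk' : k = ds.length := by omega
    rw [pvRunEnd, dif_neg hk]
    subst hk'
    simp [pvRunsAux, pvRuns]

theorem pvRunsIdx_eq_pvRuns_drop (ds : List Char) :
    ∀ i, pvRunsIdx ds i = pvRuns (ds.drop i) := by
  intro i
  induction i using pvRunsIdx.induct ds with
  | case1 i hi j ih =>
    have hd : ds.drop i = ds[i] :: ds.drop (i + 1) := List.drop_eq_getElem_cons hi
    rw [pvRunsIdx, dif_pos hi, hd, pvRuns,
        pvRunsAux_drop ds ds[i] (i + 1) 1 (by omega)]
    refine congrArg₂ List.cons (congrArg₂ Prod.mk rfl ?_) ih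
    push_cast; ring
  | case2 i hi =>
    rw [pvRunsIdx, dif_neg hi, List.drop_eq_nil_of_le (by omega), pvRuns]

-- A skips non-digit characters, so its inner fold only sees the digit filtrate
theorem pvFoldA_filter (cs : List Char) :
    ∀ st, cs.foldl pvStepA st = (cs.filter PySem.Chars.isdigit).foldl pvStepA st := by
  induction cs with
  | nil => intro st; rfl
  | cons c rest ih =>
    intro st
    by_cases hc : PySem.Chars.isdigit c
    · simp [hc, List.foldl_cons, ih]
    · have : pvStepA st c = st := by simp [pvStepA, hc]
      simp [hc, List.foldl_cons, this, ih]

-- A's state machine, started with a pending run, computes the fold of pvBumpStep over pvRunsAux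
theorem pvFoldA_runsAux (ds : List Char) :
    ∀ x cnt d, (∀ c ∈ ds, PySem.Chars.isdigit c = true) →
      (let st := ds.foldl pvStepA (some x, cnt, d)
       pvFlushA st.1 st.2.1 st.2.2) = (pvRunsAux x cnt ds).foldl pvBumpStep d := by
  induction ds with
  | nil =>
    intro x cnt d _
    simp [pvRunsAux, pvFlushA, pvBumpStep, List.foldl]
  | cons c rest ih =>
    intro x cnt d hdig
    have hc : PySem.Chars.isdigit c = true := hdig c (List.mem_cons_self ..)
    have hrest : ∀ a ∈ rest, PySem.Chars.isdigit a = true :=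
      fun a ha => hdig a (List.mem_cons_of_mem _ ha)
    by_cases hcx : c = x
    · subst hcx
      have hstep : pvStepA (some c, cnt, d) c = (some c, cnt + 1, d) := by
        simp [pvStepA, hc]
      rw [pvRunsAux, if_pos rfl, List.foldl_cons, hstep, ih c (cnt + 1) d hrest]
    · have hstep : pvStepA (some x, cnt, d) c = (some c, 1, pvFlushA (some x) cnt d) := by
        simp [pvStepA, hc, hcx]
      rw [pvRunsAux, if_neg hcx, List.foldl_cons, hstep,
          ih c 1 (pvFlushA (some x) cnt d) hrest, List.foldl_cons]
      rfl

-- per-string agreement: A's pass over s equals B's fold over the runs of s's digits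
theorem pvString_agree (s : String) (d : PySem.Dict Char (PySem.Dict Int Int)) :
    (let st := s.toList.foldl pvStepA (none, 0, d)
     pvFlushA st.1 st.2.1 st.2.2) =
      (pvRunsIdx (s.toList.filter PySem.Chars.isdigit) 0).foldl
        (fun d p => if p.2 ≠ 1 then pvBump d p.1 p.2 else d) d := by
  have hfun : (fun (d : PySem.Dict Char (PySem.Dict Int Int)) (p : Char × Int) =>
      if p.2 ≠ 1 then pvBump d p.1 p.2 else d) = pvBumpStep := rfl
  rw [hfun, pvRunsIdx_eq_pvRuns_drop _ 0, List.drop_zero]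
  rw [show (s.toList.foldl pvStepA (none, 0, d)) =
      ((s.toList.filter PySem.Chars.isdigit).foldl pvStepA (none, 0, d)) from pvFoldA_filter _ _]
  have hdig : ∀ c ∈ s.toList.filter PySem.Chars.isdigit, PySem.Chars.isdigit c = true :=
    fun c hc => (List.mem_filter.mp hc).2
  cases hds : s.toList.filter PySem.Chars.isdigit with
  | nil => simp [pvRuns, pvFlushA, List.foldl]
  | cons c rest =>
    rw [hds] at hdig
    have hc : PySem.Chars.isdigit c = true := hdig c (List.mem_cons_self ..)
    have hstep : pvStepA (none, 0, d) c = (some c, 1, d) := by simp [pvStepA, hc, pvFlushA]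
    rw [List.foldl_cons, hstep, pvRuns]
    exact pvFoldA_runsAux rest c 1 d (fun a ha => hdig a (List.mem_cons_of_mem _ ha))

-- ===== VERDICT (by name: the statement is the Claim_ definition above) =====
theorem consecutive_digit_counts_spec : Claim_equal_consecutive_digit_counts := by
  intro input_strings _
  unfold Spec_consecutive_digit_counts consecutive_digit_counts consecutive_digit_counts_alt
  have h : ∀ (l : List String) (d : PySem.Dict Char (PySem.Dict Int Int)),
      l.foldl (fun d s =>
        let st := s.toList.foldl pvStepA (none, 0, d)
        pvFlushA st.1 st.2.1 st.2.2) d =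
      l.foldl (fun d s =>
        (pvRunsIdx (s.toList.filter PySem.Chars.isdigit) 0).foldl
          (fun d p => if p.2 ≠ 1 then pvBump d p.1 p.2 else d) d) d := by
    intro l
    induction l with
    | nil => intro d; rfl
    | cons s rest ih =>
      intro d
      simp only [List.foldl_cons]
      rw [pvString_agree, ih]
  exact congrArg
    (fun c : PySem.Dict Char (PySem.Dict Int Int) =>
      c.items.map (fun p => (String.ofList [p.1], p.2.items)))
    (h input_strings PySem.Dict.empty)
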